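-- pv_equiv track=rewrite | github.com/JackLee9437/algorithm_backjoon | 프로그래머스/lv4/118670. 행렬과 연산/행렬과 연산.py | solution
-- ===== SOURCE A (Python) =====
-- from collections import deque
--
-- def solution(rc, operations):
--     matrix = deque(map(lambda x : deque(x), rc))
--     sides = [deque(x[0] for x in rc), deque(x[-1] for x in rc)]
--
--     def shiftRow() :
--         matrix.rotate(1)
--         sides[0].rotate(1)
--         sides[1].rotate(1)
--
--     def rotate() :
--         matrix[0][0] = sides[0][0]
--         matrix[-1][-1] = sides[1][-1]
--
--         matrix[0].rotate(1)
--         sides[1].rotate(1)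
--         matrix[-1].rotate(-1)
--         sides[0].rotate(-1)
--
--         sides[1][0] = matrix[0][-1]
--         sides[0][-1] = matrix[-1][0]
--
--
--     operator = {
--         "ShiftRow" : shiftRow,
--         "Rotate" : rotate
--     }
--
--     for opr in operations :
--         operator[opr]()
--
--     for r in range(len(matrix)) :
--         matrix[r][0] = sides[0][r]
--         matrix[r][-1] = sides[1][r]
--
--     return list(map(list, matrix))
-- ===== SOURCE B (Python) =====
-- def solution(rc, operations):
--     def shift_row(m):
--         return m[-1:] + m[:-1]
--
--     def rotate(m):
--         top, bottom = m[0], m[-1]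
--         mid = [[below[0]] + row[1:-1] + [above[-1]]
--                for row, above, below in zip(m[1:-1], m[:-2], m[2:])]
--         return [[m[1][0]] + top[:-1]] + mid + [bottom[1:] + [m[-2][-1]]]
--
--     step = {"ShiftRow": shift_row, "Rotate": rotate}
--     m = [list(row) for row in rc]
--     for op in operations:
--         m = step[op](m)
--     return m
-- ===== Notes on version B (the rewrite author's own statement) =====
-- stated objective: simpler
-- what changed: A tracks the first/last columns in two auxiliary deques and leaves stale edge cells in the matrix that are patched at the end; B drops the side-column bookkeeping entirely and directly simulates each operation on a plain list of lists (ShiftRow = move last row to front, Rotate = rebuild the top row, middle rows and bottom row functionally from their neighbours).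
-- outside the precondition, e.g. on solution([[1]], ['Rotate']): A returns [[1]], B raises IndexError; on solution([[1], [2]], ['Rotate']): A returns [[1], [1]], B returns [[2], [1]]; on solution([[1, 2], [3]], ['Rotate', 'Rotate']): A returns [[3, 3], [1]], B returns [[2, 3], [1]]
import Mathlib
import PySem

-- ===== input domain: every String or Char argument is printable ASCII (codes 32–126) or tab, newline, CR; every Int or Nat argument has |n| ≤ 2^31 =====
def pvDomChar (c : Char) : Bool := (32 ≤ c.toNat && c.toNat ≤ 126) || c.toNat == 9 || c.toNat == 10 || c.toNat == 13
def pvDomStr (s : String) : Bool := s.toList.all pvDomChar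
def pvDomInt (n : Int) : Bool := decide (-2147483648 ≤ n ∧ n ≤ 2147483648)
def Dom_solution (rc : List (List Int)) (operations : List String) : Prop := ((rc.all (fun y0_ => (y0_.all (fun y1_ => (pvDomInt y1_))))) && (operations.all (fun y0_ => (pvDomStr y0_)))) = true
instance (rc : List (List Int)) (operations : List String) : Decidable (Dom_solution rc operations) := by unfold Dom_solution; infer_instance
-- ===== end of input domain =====

-- B replaces A's side-column bookkeeping (deques + stale edge cells) by a direct simulation:
-- rotate the whole row list for ShiftRow and rebuild every row functionally for Rotate; same cost, plainer code.


-- ===== PORT A =====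
-- deque.rotate(1): last element moves to the front
def pvRotR {α : Type} (l : List α) : List α := l.drop (l.length - 1) ++ l.dropLast
-- deque.rotate(-1): first element moves to the end
def pvRotL {α : Type} (l : List α) : List α := l.drop 1 ++ l.take 1
-- d[-1] = v (no-op on [], where Python raises; such inputs are outside Pre_)
def pvSetLast {α : Type} (l : List α) (v : α) : List α := l.set (l.length - 1) v
def pvModifyLast {α : Type} (f : α → α) (l : List α) : List α := l.modify (l.length - 1) f

-- matrix.rotate(1); sides[0].rotate(1); sides[1].rotate(1)
def pvShiftA (st : List (List Int) × List Int × List Int) : List (List Int) × List Int × List Int :=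
  (pvRotR st.1, pvRotR st.2.1, pvRotR st.2.2)

-- the rotate() closure, statement for statement (matrix[0] and matrix[-1] are distinct deques
-- whenever the matrix has ≥ 2 rows, which Pre_ guarantees when a Rotate occurs)
def pvRotateA (st : List (List Int) × List Int × List Int) : List (List Int) × List Int × List Int :=
  let m := st.1
  let s0 := st.2.1
  let s1 := st.2.2
  let m := m.modify 0 (fun row => row.set 0 (s0.headD 0))            -- matrix[0][0] = sides[0][0]
  let m := pvModifyLast (fun row => pvSetLast row (s1.getLastD 0)) m -- matrix[-1][-1] = sides[1][-1]
  let m := m.modify 0 pvRotR                                         -- matrix[0].rotate(1)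
  let s1 := pvRotR s1                                                -- sides[1].rotate(1)
  let m := pvModifyLast pvRotL m                                     -- matrix[-1].rotate(-1)
  let s0 := pvRotL s0                                                -- sides[0].rotate(-1)
  let s1 := s1.set 0 ((m.headD []).getLastD 0)                       -- sides[1][0] = matrix[0][-1]
  let s0 := pvSetLast s0 ((m.getLastD []).headD 0)                   -- sides[0][-1] = matrix[-1][0]
  (m, s0, s1)

-- operator[opr]() — any other key raises KeyError (outside Pre_; the port then leaves the state unchanged)
def pvStepA (st : List (List Int) × List Int × List Int) (op : String) : List (List Int) × List Int × List Int :=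
  if op = "ShiftRow" then pvShiftA st else if op = "Rotate" then pvRotateA st else st

-- matrix[r][0] = sides[0][r]; matrix[r][-1] = sides[1][r] — one row per index r (the three
-- lists always have equal length, so the zip-style recursion matches the Python index loop)
def pvWb3 : List (List Int) → List Int → List Int → List (List Int)
  | row :: m, a :: s0, b :: s1 => pvSetLast (row.set 0 a) b :: pvWb3 m s0 s1
  | _, _, _ => []

def solution (rc : List (List Int)) (operations : List String) : List (List Int) :=
  -- sides = [deque(x[0] for x in rc), deque(x[-1] for x in rc)]  (x[0]/x[-1] raise on an empty row: outside Pre_)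
  let st := operations.foldl pvStepA (rc, rc.map (fun x => x.headD 0), rc.map (fun x => x.getLastD 0))
  pvWb3 st.1 st.2.1 st.2.2

-- ===== PORT B =====
def pvStepB (m : List (List Int)) (op : String) : List (List Int) :=
  if op = "ShiftRow" then
    PySem.List.slice m (some (-1)) none ++ PySem.List.slice m none (some (-1))   -- m[-1:] + m[:-1]
  else if op = "Rotate" then
    let top := m.headD []
    let bottom := m.getLastD []
    let mid := List.zipWith3
      (fun row above below => below.headD 0 :: (PySem.List.slice row (some 1) (some (-1)) ++ [above.getLastD 0]))
      (PySem.List.slice m (some 1) (some (-1))) (PySem.List.slice m none (some (-2))) (PySem.List.slice m (some 2) none)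
    let newTop := (m.getD 1 []).headD 0 :: PySem.List.slice top none (some (-1))
    let newBottom := PySem.List.slice bottom (some 1) none ++ [(m.getD (m.length - 2) []).getLastD 0]
    newTop :: (mid ++ [newBottom])
  else m

def solution_alt (rc : List (List Int)) (operations : List String) : List (List Int) :=
  operations.foldl pvStepB (rc.map (fun row => row))

-- ===== PRECONDITION & SPEC =====
-- Pre_ excludes: an operation string other than "ShiftRow"/"Rotate" or a matrix containing an empty row
-- (A raises KeyError / IndexError there), and — when a "Rotate" occurs — matrices that are not rectangular
-- with at least 2 rows and 2 columns, on which A's deque-aliasing and stale-edge-cell bookkeeping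
-- return accidental values (see the cited excluded examples).
def Pre_solution (rc : List (List Int)) (operations : List String) : Prop :=
  (∀ row ∈ rc, row ≠ []) ∧
  (∀ op ∈ operations, op = "ShiftRow" ∨ op = "Rotate") ∧
  ("Rotate" ∈ operations →
    2 ≤ rc.length ∧ 2 ≤ (rc.headD []).length ∧ ∀ row ∈ rc, row.length = (rc.headD []).length)
instance (rc : List (List Int)) (operations : List String) : Decidable (Pre_solution rc operations) := by
  unfold Pre_solution; infer_instance

def pvWitness_solution : List (List Int) × List String :=
  ([[1, 2, 3], [4, 5, 6], [7, 8, 9]], ["Rotate", "ShiftRow", "Rotate"])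

def Spec_solution (rc : List (List Int)) (operations : List String) (out : List (List Int)) : Prop := out = solution_alt rc operations
instance (rc : List (List Int)) (operations : List String) (out : List (List Int)) : Decidable (Spec_solution rc operations out) := by unfold Spec_solution; infer_instance

-- ===== CLAIM (what is proved, stated in full; the proofs are below) =====
def Claim_equal_solution : Prop := ∀ (rc : List (List Int)) (operations : List String), Dom_solution rc operations → Pre_solution rc operations → Spec_solution rc operations (solution rc operations)

-- ===== LEMMAS AND PROOFS =====

def pvRect (C : Nat) (m : List (List Int)) : Prop := ∀ row ∈ m, row.length = C

-- length lemmas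

theorem pvLen_rotR {α : Type} (l : List α) : (pvRotR l).length = l.length := by simp [pvRotR]

theorem pvLen_rotL {α : Type} (l : List α) : (pvRotL l).length = l.length := by
  simp [pvRotL]; omega

theorem pvLen_setLast {α : Type} (l : List α) (v : α) : (pvSetLast l v).length = l.length := by
  simp [pvSetLast]

theorem pvLen_modifyLast {α : Type} (f : α → α) (l : List α) : (pvModifyLast f l).length = l.length := by
  simp [pvModifyLast]

theorem pvLen_wb3 (m : List (List Int)) (s0 s1 : List Int)
    (h0 : s0.length = m.length) (h1 : s1.length = m.length) : (pvWb3 m s0 s1).length = m.length := by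
  induction m generalizing s0 s1 with
  | nil => simp [pvWb3]
  | cons row m ih =>
    cases s0 with
    | nil => simp at h0
    | cons a s0 =>
      cases s1 with
      | nil => simp at h1
      | cons b s1 => simp [pvWb3]; exact ih s0 s1 (by simpa using h0) (by simpa using h1)
-- getD lemmas

theorem pvGetD_eq {α : Type} (l : List α) (i : Nat) (d : α) (h : i < l.length) : l.getD i d = l[i] := by
  simp [List.getD_eq_getElem?_getD, List.getElem?_eq_getElem h]

theorem pvGetD_rotR {α : Type} (l : List α) (i : Nat) (d : α) (h : i < l.length) :
    (pvRotR l).getD i d = if i = 0 then l.getD (l.length - 1) d else l.getD (i - 1) d := by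
  have h' : i < (pvRotR l).length := by rw [pvLen_rotR]; exact h
  rw [pvGetD_eq _ _ _ h']
  unfold pvRotR
  rw [List.getElem_append]
  split_ifs with h1 h2 h3
  · simp only [List.getElem_drop]
    rw [pvGetD_eq _ _ _ (by omega)]
    congr 1
    simp at h1; omega
  · simp at h1 h2; omega
  · simp at h1; omega
  · rw [List.getElem_dropLast, pvGetD_eq _ _ _ (by simp at h1 ⊢; omega)]
    congr 1
    simp at h1 ⊢; omega

theorem pvGetD_rotL {α : Type} (l : List α) (i : Nat) (d : α) (h : i < l.length) :
    (pvRotL l).getD i d = if i = l.length - 1 then l.getD 0 d else l.getD (i + 1) d := by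
  have h' : i < (pvRotL l).length := by simp [pvRotL]; omega
  rw [pvGetD_eq _ _ _ h']
  unfold pvRotL
  rw [List.getElem_append]
  split_ifs with h1 h2 h3
  · simp at h1; omega
  · simp only [List.getElem_drop]
    rw [pvGetD_eq _ _ _ (by omega)]
    congr 1; omega
  · rw [List.getElem_take, pvGetD_eq _ _ _ (by simp at h1 ⊢; omega)]
    congr 1; simp at h1 ⊢; omega
  · simp at h1 h3; omega

theorem pvGetD_set {α : Type} (l : List α) (j i : Nat) (v d : α) (h : i < l.length) :
    (l.set j v).getD i d = if j = i then v else l.getD i d := by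
  rw [pvGetD_eq _ _ _ (by simpa using h), List.getElem_set]
  split_ifs with h1
  · rfl
  · rw [pvGetD_eq _ _ _ h]

theorem pvGetD_setLast {α : Type} (l : List α) (v d : α) (i : Nat) (h : i < l.length) :
    (pvSetLast l v).getD i d = if i = l.length - 1 then v else l.getD i d := by
  unfold pvSetLast
  rw [pvGetD_set _ _ _ _ _ h]
  split_ifs with h1 h2 h3 <;> first | rfl | omega | contradiction

theorem pvGetD_modify {α : Type} (l : List α) (j i : Nat) (f : α → α) (d : α) (h : i < l.length) :
    (l.modify j f).getD i d = if j = i then f (l.getD i d) else l.getD i d := by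
  rw [pvGetD_eq _ _ _ (by simpa using h), List.getElem_modify]
  split_ifs with h1
  · rw [pvGetD_eq _ _ _ h]
  · rw [pvGetD_eq _ _ _ h]

theorem pvGetD_modifyLast {α : Type} (l : List α) (i : Nat) (f : α → α) (d : α) (h : i < l.length) :
    (pvModifyLast f l).getD i d = if i = l.length - 1 then f (l.getD i d) else l.getD i d := by
  unfold pvModifyLast
  rw [pvGetD_modify _ _ _ _ _ h]
  split_ifs with h1 h2 h3 <;> first | rfl | omega | contradiction

theorem pvHeadD_eq {α : Type} (l : List α) (d : α) : l.headD d = l.getD 0 d := by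
  cases l <;> rfl

theorem pvGetLastD_eq {α : Type} (l : List α) (d : α) : l.getLastD d = l.getD (l.length - 1) d := by
  induction l with
  | nil => rfl
  | cons x xs ih =>
    cases xs with
    | nil => rfl
    | cons y ys => simpa using ih

theorem pvGetD_wb3 (m : List (List Int)) (s0 s1 : List Int) (r : Nat)
    (h0 : s0.length = m.length) (h1 : s1.length = m.length) (hr : r < m.length) :
    (pvWb3 m s0 s1).getD r [] = pvSetLast ((m.getD r []).set 0 (s0.getD r 0)) (s1.getD r 0) := by
  induction m generalizing s0 s1 r with
  | nil => simp at hr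
  | cons row m ih =>
    cases s0 with
    | nil => simp at h0
    | cons a s0 =>
      cases s1 with
      | nil => simp at h1
      | cons b s1 =>
        cases r with
        | zero => rfl
        | succ r =>
          simp only [pvWb3, List.getD_cons_succ]
          exact ih s0 s1 r (by simpa using h0) (by simpa using h1) (by simpa using hr)

theorem pvGetD_drop {α : Type} (l : List α) (n i : Nat) (d : α) (h : i < (l.drop n).length) :
    (l.drop n).getD i d = l.getD (n + i) d := by
  rw [pvGetD_eq _ _ _ h, List.getElem_drop, pvGetD_eq _ _ _ (by simp at h; omega)]

theorem pvGetD_dropLast {α : Type} (l : List α) (i : Nat) (d : α) (h : i < l.dropLast.length) :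
    l.dropLast.getD i d = l.getD i d := by
  rw [pvGetD_eq _ _ _ h, List.getElem_dropLast, pvGetD_eq _ _ _ (by simp at h; omega)]

theorem pvLen_zipWith3 {α β γ δ : Type} (f : α → β → γ → δ) (a : List α) (b : List β) (c : List γ) :
    (List.zipWith3 f a b c).length = min a.length (min b.length c.length) := by
  induction a generalizing b c with
  | nil => simp [List.zipWith3]
  | cons x xs ih =>
    cases b with
    | nil => simp [List.zipWith3]
    | cons y ys =>
      cases c with
      | nil => simp [List.zipWith3]
      | cons z zs => simp [List.zipWith3, ih]

theorem pvGetD_zipWith3 {α β γ δ : Type} (f : α → β → γ → δ) (a : List α) (b : List β) (c : List γ)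
    (i : Nat) (da : α) (db : β) (dc : γ) (dd : δ) (h : i < (List.zipWith3 f a b c).length) :
    (List.zipWith3 f a b c).getD i dd = f (a.getD i da) (b.getD i db) (c.getD i dc) := by
  induction a generalizing b c i with
  | nil => simp [List.zipWith3] at h
  | cons x xs ih =>
    cases b with
    | nil => simp [List.zipWith3] at h
    | cons y ys =>
      cases c with
      | nil => simp [List.zipWith3] at h
      | cons z zs =>
        cases i with
        | zero => rfl
        | succ i => simpa [List.zipWith3] using ih ys zs i (by simpa [List.zipWith3] using h)
-- slice bridges

theorem pvSlice_one_neg_one {α : Type} (l : List α) :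
    PySem.List.slice l (some 1) (some (-1)) = l.tail.dropLast := by
  cases l with
  | nil => simp [PySem.List.slice]
  | cons a t =>
    simp only [PySem.List.slice, PySem.List.clampIdx]
    norm_num
    simp [List.dropLast_eq_take]
    split_ifs <;> simp <;> omega

theorem pvExt_getD {α : Type} (a b : List α) (d : α) (hl : a.length = b.length)
    (h : ∀ i, i < a.length → a.getD i d = b.getD i d) : a = b := by
  apply List.ext_getElem hl
  intro i h1 h2
  rw [← pvGetD_eq a i d h1, ← pvGetD_eq b i d h2]
  exact h i h1
-- ShiftRow: B's slice expression is A's deque rotation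

theorem pvStepB_shift (m : List (List Int)) : pvStepB m "ShiftRow" = pvRotR m := by
  simp [pvStepB, pvRotR, PySem.List.slice_from_neg_one, PySem.List.slice_to_neg_one]

theorem pvShift_comm (m : List (List Int)) (s0 s1 : List Int)
    (h0 : s0.length = m.length) (h1 : s1.length = m.length) :
    pvWb3 (pvShiftA (m, s0, s1)).1 (pvShiftA (m, s0, s1)).2.1 (pvShiftA (m, s0, s1)).2.2
      = pvRotR (pvWb3 m s0 s1) := by
  simp only [pvShiftA]
  have hw : (pvWb3 m s0 s1).length = m.length := pvLen_wb3 m s0 s1 h0 h1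
  apply pvExt_getD _ _ [] (by rw [pvLen_wb3 _ _ _ (by simp [pvLen_rotR, h0]) (by simp [pvLen_rotR, h1]), pvLen_rotR, pvLen_rotR, hw])
  intro r hr
  rw [pvLen_wb3 _ _ _ (by simp [pvLen_rotR, h0]) (by simp [pvLen_rotR, h1]), pvLen_rotR] at hr
  rw [pvGetD_wb3 _ _ _ _ (by simp [pvLen_rotR, h0]) (by simp [pvLen_rotR, h1]) (by rw [pvLen_rotR]; exact hr)]
  rw [pvGetD_rotR m r [] hr, pvGetD_rotR s0 r 0 (by omega), pvGetD_rotR s1 r 0 (by omega),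
    pvGetD_rotR (pvWb3 m s0 s1) r [] (by rw [hw]; exact hr)]
  rw [hw, h0, h1]
  split_ifs with hzero
  · rw [pvGetD_wb3 _ _ _ _ h0 h1 (by omega)]
  · rw [pvGetD_wb3 _ _ _ _ h0 h1 (by omega)]

-- Rotate: decoding A's state (matrix + side columns) and doing B's border rotation commute

theorem pvPres_shift (m : List (List Int)) (C : Nat) (hrect : pvRect C m) : pvRect C (pvRotR m) := by
  intro row hrow
  rcases List.mem_append.1 hrow with h | h
  · exact hrect row (List.mem_of_mem_drop h)
  · exact hrect row (List.mem_of_mem_dropLast h)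

theorem pvGetD_append {α : Type} (a b : List α) (i : Nat) (d : α) (h : i < a.length + b.length) :
    (a ++ b).getD i d = if i < a.length then a.getD i d else b.getD (i - a.length) d := by
  rw [pvGetD_eq _ _ _ (by simp; omega), List.getElem_append]
  split_ifs with h1
  · rw [pvGetD_eq _ _ _ h1]
  · rw [pvGetD_eq _ _ _ (by omega)]

theorem pvLen_rotA_m (m : List (List Int)) (s0 s1 : List Int) :
    (pvRotateA (m, s0, s1)).1.length = m.length := by
  simp [pvRotateA, pvLen_modifyLast]

theorem pvLen_rotA_s0 (m : List (List Int)) (s0 s1 : List Int) :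
    (pvRotateA (m, s0, s1)).2.1.length = s0.length := by
  simp [pvRotateA, pvLen_setLast, pvLen_rotL]

theorem pvLen_rotA_s1 (m : List (List Int)) (s0 s1 : List Int) :
    (pvRotateA (m, s0, s1)).2.2.length = s1.length := by
  simp [pvRotateA, pvLen_rotR]

-- the matrix rows after one rotate(): top row rotated right (with the repaired corner),
-- bottom row rotated left (with the repaired corner), all other rows untouched

theorem pvRotA_m (m : List (List Int)) (s0 s1 : List Int)
    (hR : 2 ≤ m.length) (h1 : s1.length = m.length) (r : Nat) (hr : r < m.length) :
    (pvRotateA (m, s0, s1)).1.getD r [] =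
      if r = 0 then pvRotR ((m.getD 0 []).set 0 (s0.headD 0))
      else if r = m.length - 1 then pvRotL (pvSetLast (m.getD r []) (s1.getD (m.length - 1) 0))
      else m.getD r [] := by
  simp only [pvRotateA]
  rw [pvGetD_modifyLast _ _ _ _ (by simp [pvLen_modifyLast]; omega)]
  rw [pvGetD_modify _ _ _ _ _ (by simp [pvLen_modifyLast]; omega)]
  rw [pvGetD_modifyLast _ _ _ _ (by simp; omega)]
  rw [pvGetD_modify _ _ _ _ _ (by omega)]
  rw [pvGetLastD_eq s1 0, h1]
  simp only [pvLen_modifyLast, List.length_modify]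
  split_ifs with ha hb hc hd he hf hg
  all_goals (try rfl); (try omega)
  all_goals (try (subst hf; rfl))
  all_goals (try (subst he; rfl))
  all_goals done

theorem pvRotA_s0 (m : List (List Int)) (s0 s1 : List Int) (C : Nat)
    (hR : 2 ≤ m.length) (h0 : s0.length = m.length) (h1 : s1.length = m.length)
    (hC : 2 ≤ C) (hCr : (m.getD (m.length - 1) []).length = C)
    (r : Nat) (hr : r < m.length) :
    (pvRotateA (m, s0, s1)).2.1.getD r 0 =
      if r = m.length - 1 then
        (if 1 = C - 1 then s1.getD (m.length - 1) 0 else (m.getD (m.length - 1) []).getD 1 0)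
      else s0.getD (r + 1) 0 := by
  have hbrow := pvRotA_m m s0 s1 hR h1 (m.length - 1) (by omega)
  rw [if_neg (by omega), if_pos rfl] at hbrow
  simp only [pvRotateA] at hbrow ⊢
  rw [pvGetD_setLast _ _ _ _ (by rw [pvLen_rotL, h0]; exact hr), pvLen_rotL, h0]
  by_cases ha : r = m.length - 1
  · rw [if_pos ha, if_pos ha]
    rw [pvGetLastD_eq, pvHeadD_eq]
    rw [show (pvModifyLast pvRotL
        ((pvModifyLast (fun row => pvSetLast row (s1.getLastD 0))
          (m.modify 0 fun row => row.set 0 (s0.headD 0))).modify 0 pvRotR)).length = m.length by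
      simp [pvLen_modifyLast]]
    rw [hbrow]
    rw [pvGetD_rotL _ 0 0 (by rw [pvLen_setLast, hCr]; omega), pvLen_setLast, hCr]
    rw [if_neg (by omega)]
    rw [pvGetD_setLast _ _ _ _ (by rw [hCr]; omega), hCr]
  · rw [if_neg ha, if_neg ha]
    rw [pvGetD_rotL s0 r 0 (by omega), h0, if_neg ha]
  done

theorem pvRotA_s1 (m : List (List Int)) (s0 s1 : List Int) (C : Nat)
    (hR : 2 ≤ m.length) (h0 : s0.length = m.length) (h1 : s1.length = m.length)
    (hC : 2 ≤ C) (hCr : (m.getD 0 []).length = C)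
    (r : Nat) (hr : r < m.length) :
    (pvRotateA (m, s0, s1)).2.2.getD r 0 =
      if r = 0 then
        (if C - 2 = 0 then s0.getD 0 0 else (m.getD 0 []).getD (C - 2) 0)
      else s1.getD (r - 1) 0 := by
  have htrow := pvRotA_m m s0 s1 hR h1 0 (by omega)
  rw [if_pos rfl] at htrow
  simp only [pvRotateA] at htrow ⊢
  rw [pvGetD_set _ _ _ _ _ (by rw [pvLen_rotR, h1]; exact hr)]
  by_cases ha : r = 0
  · rw [if_pos (by omega), if_pos ha]
    rw [pvHeadD_eq, pvGetLastD_eq]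
    rw [htrow]
    rw [pvLen_rotR, List.length_set, hCr]
    rw [pvGetD_rotR _ _ _ (by rw [List.length_set, hCr]; omega)]
    rw [if_neg (by omega)]
    rw [pvGetD_set _ _ _ _ _ (by rw [hCr]; omega)]
    rw [show C - 1 - 1 = C - 2 from by omega]
    rw [pvHeadD_eq]
    split_ifs with hb hc hd <;> first | rfl | omega | contradiction
  · rw [if_neg (by omega), if_neg ha]
    rw [pvGetD_rotR s1 r 0 (by omega), if_neg ha]
  done

theorem pvGetD_take {α : Type} (l : List α) (n i : Nat) (d : α) (h : i < (l.take n).length) :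
    (l.take n).getD i d = l.getD i d := by
  rw [pvGetD_eq _ _ _ h, List.getElem_take, pvGetD_eq _ _ _ (by simp at h; omega)]

theorem pvStepB_rotate (M : List (List Int)) (hR : 2 ≤ M.length) :
    pvStepB M "Rotate" = ((M.getD 1 []).headD 0 :: (M.headD []).dropLast) ::
      (List.zipWith3 (fun row above below => below.headD 0 :: (row.tail.dropLast ++ [above.getLastD 0]))
         (M.tail.dropLast) (M.take (M.length - 2)) (M.drop 2)
       ++ [(M.getLastD []).tail ++ [(M.getD (M.length - 2) []).getLastD 0]]) := by
  rw [pvStepB]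
  rw [if_neg (by decide), if_pos rfl]
  rw [PySem.List.slice_to_neg_ofNat M 2 (by omega)]
  rw [PySem.List.slice_from M (a := 2) (by norm_num)]
  simp only [pvSlice_one_neg_one, PySem.List.slice_to_neg_one, PySem.List.slice_from_one,
    show ((2:Int).toNat) = 2 from rfl]

theorem pvRot_comm' (m : List (List Int)) (s0 s1 : List Int) (C : Nat)
    (h0 : s0.length = m.length) (h1 : s1.length = m.length)
    (hR : 2 ≤ m.length) (hC : 2 ≤ C) (hrect : pvRect C m) :
    pvWb3 (pvRotateA (m, s0, s1)).1 (pvRotateA (m, s0, s1)).2.1 (pvRotateA (m, s0, s1)).2.2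
      = pvStepB (pvWb3 m s0 s1) "Rotate" := by
  have hrow : ∀ k, k < m.length → (m.getD k []).length = C := fun k hk =>
    hrect _ (by rw [pvGetD_eq m k [] hk]; exact List.getElem_mem _)
  have hMlen : (pvWb3 m s0 s1).length = m.length := pvLen_wb3 m s0 s1 h0 h1
  have hMget : ∀ k, k < m.length → (pvWb3 m s0 s1).getD k [] =
      pvSetLast ((m.getD k []).set 0 (s0.getD k 0)) (s1.getD k 0) := fun k hk =>
    pvGetD_wb3 m s0 s1 k h0 h1 hk
  have hMrowlen : ∀ k, k < m.length → ((pvWb3 m s0 s1).getD k []).length = C := by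
    intro k hk
    rw [hMget k hk, pvLen_setLast, List.length_set, hrow k hk]
  have hMentry : ∀ k i, k < m.length → i < C → ((pvWb3 m s0 s1).getD k []).getD i 0 =
      if i = C - 1 then s1.getD k 0 else if i = 0 then s0.getD k 0 else (m.getD k []).getD i 0 := by
    intro k i hk hi
    rw [hMget k hk, pvGetD_setLast _ _ _ _ (by rw [List.length_set, hrow k hk]; exact hi),
      List.length_set, hrow k hk]
    by_cases hend : i = C - 1
    · rw [if_pos hend, if_pos hend]
    · rw [if_neg hend, if_neg hend, pvGetD_set _ _ _ _ _ (by rw [hrow k hk]; exact hi)]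
      by_cases hzero : i = 0
      · rw [if_pos (show (0:Nat) = i from by omega), if_pos hzero]
      · rw [if_neg (show ¬(0:Nat) = i from by omega), if_neg hzero]
  rw [pvStepB_rotate _ (by omega)]
  have hmidlen : (List.zipWith3 (fun row above below => below.headD 0 :: (row.tail.dropLast ++ [above.getLastD 0]))
      ((pvWb3 m s0 s1).tail.dropLast) (List.take ((pvWb3 m s0 s1).length - 2) (pvWb3 m s0 s1))
      (List.drop 2 (pvWb3 m s0 s1))).length = m.length - 2 := by
    rw [pvLen_zipWith3]
    simp [hMlen]
    omega
  have hLlen0 : (pvRotateA (m, s0, s1)).2.1.length = (pvRotateA (m, s0, s1)).1.length := by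
    rw [pvLen_rotA_s0, pvLen_rotA_m, h0]
  have hLlen1 : (pvRotateA (m, s0, s1)).2.2.length = (pvRotateA (m, s0, s1)).1.length := by
    rw [pvLen_rotA_s1, pvLen_rotA_m, h1]
  apply pvExt_getD _ _ []
  · rw [pvLen_wb3 _ _ _ hLlen0 hLlen1, pvLen_rotA_m]
    simp only [List.length_cons, List.length_append, hmidlen, List.length_nil]
    omega
  intro r hr
  rw [pvLen_wb3 _ _ _ hLlen0 hLlen1, pvLen_rotA_m] at hr
  rw [pvGetD_wb3 _ _ _ _ hLlen0 hLlen1 (by rw [pvLen_rotA_m]; exact hr)]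
  have hA := pvRotA_m m s0 s1 hR h1 r hr
  have hB := pvRotA_s0 m s0 s1 C hR h0 h1 hC (hrow _ (by omega)) r hr
  have hD := pvRotA_s1 m s0 s1 C hR h0 h1 hC (hrow _ (by omega)) r hr
  rw [pvHeadD_eq s0 0] at hA
  by_cases hr0 : r = 0
  · -- top row of the result
    rw [if_pos hr0] at hA
    rw [if_neg (show ¬ r = m.length - 1 from by omega)] at hB
    rw [if_pos hr0] at hD
    rw [hA, hB, hD, hr0, List.getD_cons_zero]
    apply pvExt_getD _ _ 0
    · rw [pvLen_setLast, List.length_set, pvLen_rotR, List.length_set, hrow 0 (by omega),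
        List.length_cons, List.length_dropLast, pvHeadD_eq (pvWb3 m s0 s1) [], hMrowlen 0 (by omega)]
      omega
    intro i hi
    rw [pvLen_setLast, List.length_set, pvLen_rotR, List.length_set, hrow 0 (by omega)] at hi
    rw [pvGetD_setLast _ _ _ _ (by rw [List.length_set, pvLen_rotR, List.length_set, hrow 0 (by omega)]; exact hi),
      List.length_set, pvLen_rotR, List.length_set, hrow 0 (by omega),
      pvGetD_set _ _ _ _ _ (by rw [pvLen_rotR, List.length_set, hrow 0 (by omega)]; exact hi)]
    by_cases hi0 : i = 0
    · rw [hi0, List.getD_cons_zero, pvHeadD_eq, hMentry 1 0 (by omega) (by omega)]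
      split_ifs with hb hc hd he <;> first | rfl | omega | contradiction
    · rw [show i = (i - 1) + 1 from by omega, List.getD_cons_succ,
        show (i - 1) + 1 = i from by omega,
        pvGetD_dropLast _ _ _ (by rw [List.length_dropLast, pvHeadD_eq (pvWb3 m s0 s1) [], hMrowlen 0 (by omega)]; omega),
        pvHeadD_eq (pvWb3 m s0 s1) [], hMentry 0 (i - 1) (by omega) (by omega),
        pvGetD_rotR _ _ _ (by rw [List.length_set, hrow 0 (by omega)]; exact hi),
        pvGetD_set _ _ _ _ _ (by simp only [List.length_set, hrow 0 (by omega)]; omega),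
        pvGetD_set _ _ _ _ _ (by simp only [List.length_set, hrow 0 (by omega)]; omega),
        List.length_set, hrow 0 (by omega)]
      split_ifs with hb hc hd he hf hg hh <;>
        first | rfl | omega | (congr 1; omega)
  · rw [if_neg hr0] at hA hD
    rw [show r = (r - 1) + 1 from by omega, List.getD_cons_succ,
      show (r - 1) + 1 = r from by omega,
      pvGetD_append _ _ _ _ (by rw [hmidlen]; simp; omega), hmidlen]
    by_cases hrL : r = m.length - 1
    · -- bottom row of the result
      rw [if_pos hrL] at hA hB
      rw [hA, hB, hD]
      rw [if_neg (show ¬ r - 1 < m.length - 2 from by omega),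
        show r - 1 - (m.length - 2) = 0 from by omega, List.getD_cons_zero,
        show r = m.length - 1 from hrL]
      apply pvExt_getD _ _ 0
      · rw [pvLen_setLast, List.length_set, pvLen_rotL, pvLen_setLast, hrow (m.length - 1) (by omega),
          List.length_append, List.length_tail, pvGetLastD_eq (pvWb3 m s0 s1) [], hMlen,
          hMrowlen (m.length - 1) (by omega)]
        simp
        omega
      intro i hi
      rw [pvLen_setLast, List.length_set, pvLen_rotL, pvLen_setLast, hrow (m.length - 1) (by omega)] at hi
      rw [pvGetD_setLast _ _ _ _ (by rw [List.length_set, pvLen_rotL, pvLen_setLast, hrow (m.length - 1) (by omega)]; exact hi),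
        List.length_set, pvLen_rotL, pvLen_setLast, hrow (m.length - 1) (by omega),
        pvGetD_append _ _ _ _ (by rw [List.length_tail, pvGetLastD_eq (pvWb3 m s0 s1) [], hMlen, hMrowlen (m.length - 1) (by omega)]; simp; omega),
        List.length_tail, pvGetLastD_eq (pvWb3 m s0 s1) [], hMlen, hMrowlen (m.length - 1) (by omega),
        pvGetD_set _ _ _ _ _ (by rw [pvLen_rotL, pvLen_setLast, hrow (m.length - 1) (by omega)]; exact hi)]
      by_cases hlast : i = C - 1
      · rw [if_pos hlast, if_neg (show ¬ i < C - 1 from by omega),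
          show i - (C - 1) = 0 from by omega, List.getD_cons_zero,
          pvGetLastD_eq, hMrowlen (m.length - 2) (by omega),
          hMentry (m.length - 2) (C - 1) (by omega) (by omega),
          show m.length - 1 - 1 = m.length - 2 from by omega]
        split_ifs with hb hc <;> first | rfl | omega | contradiction
      · rw [if_neg hlast, if_pos (show i < C - 1 from by omega)]
        have htail : ((pvWb3 m s0 s1).getD (m.length - 1) []).tail.getD i 0
            = ((pvWb3 m s0 s1).getD (m.length - 1) []).getD (i + 1) 0 := by
          rw [← List.drop_one, pvGetD_drop _ _ _ _ (by rw [List.length_drop, hMrowlen (m.length - 1) (by omega)]; omega),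
            Nat.add_comm]
        rw [htail, hMentry (m.length - 1) (i + 1) (by omega) (by omega)]
        by_cases hi0 : i = 0
        · rw [hi0]
          split_ifs with hb hc hd he <;> first | rfl | omega | contradiction
        · rw [pvGetD_rotL _ _ _ (by rw [pvLen_setLast, hrow (m.length - 1) (by omega)]; omega),
            pvLen_setLast, hrow (m.length - 1) (by omega),
            pvGetD_setLast _ _ _ _ (by rw [hrow (m.length - 1) (by omega)]; omega),
            pvGetD_setLast _ _ _ _ (by rw [hrow (m.length - 1) (by omega)]; omega),
            hrow (m.length - 1) (by omega)]
          split_ifs with hb hc hd he hf <;> first | rfl | omega | contradiction | (congr 1; omega)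
    · -- middle rows of the result
      rw [if_neg hrL] at hA hB
      rw [hA, hB, hD]
      rw [if_pos (show r - 1 < m.length - 2 from by omega)]
      rw [pvGetD_zipWith3 _ _ _ _ _ [] [] [] [] (by rw [pvLen_zipWith3]; simp [hMlen]; omega)]
      have harg1 : (pvWb3 m s0 s1).tail.dropLast.getD (r - 1) [] = (pvWb3 m s0 s1).getD r [] := by
        rw [pvGetD_dropLast _ _ _ (by rw [List.length_dropLast, List.length_tail, hMlen]; omega),
          ← List.drop_one, pvGetD_drop _ _ _ _ (by rw [List.length_drop, hMlen]; omega),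
          show 1 + (r - 1) = r from by omega]
      have harg2 : (List.take ((pvWb3 m s0 s1).length - 2) (pvWb3 m s0 s1)).getD (r - 1) []
          = (pvWb3 m s0 s1).getD (r - 1) [] := by
        rw [pvGetD_take _ _ _ _ (by rw [List.length_take, hMlen]; omega)]
      have harg3 : (List.drop 2 (pvWb3 m s0 s1)).getD (r - 1) [] = (pvWb3 m s0 s1).getD (r + 1) [] := by
        rw [pvGetD_drop _ _ _ _ (by rw [List.length_drop, hMlen]; omega),
          show 2 + (r - 1) = r + 1 from by omega]
      rw [harg1, harg2, harg3]
      apply pvExt_getD _ _ 0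
      · rw [pvLen_setLast, List.length_set, hrow r hr, List.length_cons, List.length_append,
          List.length_dropLast, List.length_tail, hMrowlen r hr]
        simp
        omega
      intro i hi
      rw [pvLen_setLast, List.length_set, hrow r hr] at hi
      rw [pvGetD_setLast _ _ _ _ (by rw [List.length_set, hrow r hr]; exact hi),
        List.length_set, hrow r hr,
        pvGetD_set _ _ _ _ _ (by rw [hrow r hr]; exact hi)]
      by_cases hi0 : i = 0
      · rw [hi0, List.getD_cons_zero, pvHeadD_eq, hMentry (r + 1) 0 (by omega) (by omega)]
        split_ifs with hb hc hd he <;> first | rfl | omega | contradiction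
      · rw [show i = (i - 1) + 1 from by omega, List.getD_cons_succ,
          show (i - 1) + 1 = i from by omega,
          pvGetD_append _ _ _ _ (by rw [List.length_dropLast, List.length_tail, hMrowlen r hr]; simp; omega),
          List.length_dropLast, List.length_tail, hMrowlen r hr]
        by_cases hlast : i = C - 1
        · rw [if_neg (show ¬ i - 1 < C - 1 - 1 from by omega),
            show i - 1 - (C - 1 - 1) = 0 from by omega, List.getD_cons_zero,
            pvGetLastD_eq, hMrowlen (r - 1) (by omega),
            hMentry (r - 1) (C - 1) (by omega) (by omega)]
          split_ifs with hb hc <;> first | rfl | omega | contradiction | (congr 1; omega)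
        · rw [if_pos (show i - 1 < C - 1 - 1 from by omega)]
          have htail : ((pvWb3 m s0 s1).getD r []).tail.dropLast.getD (i - 1) 0
              = ((pvWb3 m s0 s1).getD r []).getD i 0 := by
            rw [pvGetD_dropLast _ _ _ (by rw [List.length_dropLast, List.length_tail, hMrowlen r hr]; omega),
              ← List.drop_one, pvGetD_drop _ _ _ _ (by rw [List.length_drop, hMrowlen r hr]; omega),
              show 1 + (i - 1) = i from by omega]
          rw [htail, hMentry r i (by omega) (by omega)]
          split_ifs with hb hc hd he <;> first | rfl | omega | contradiction

theorem pvPres_rot (m : List (List Int)) (s0 s1 : List Int) (C : Nat)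
    (hR : 2 ≤ m.length) (h1 : s1.length = m.length) (hrect : pvRect C m) :
    pvRect C (pvRotateA (m, s0, s1)).1 := by
  have hrow : ∀ k, k < m.length → (m.getD k []).length = C := fun k hk =>
    hrect _ (by rw [pvGetD_eq m k [] hk]; exact List.getElem_mem _)
  intro row hrow'
  rw [List.mem_iff_getElem] at hrow'
  obtain ⟨r, hlt, heq⟩ := hrow'
  rw [pvLen_rotA_m] at hlt
  have hchar := pvRotA_m m s0 s1 hR h1 r hlt
  rw [pvGetD_eq _ _ _ (by rw [pvLen_rotA_m]; exact hlt), heq] at hchar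
  rw [hchar]
  split_ifs with ha hb
  · rw [pvLen_rotR, List.length_set]
    exact hrow 0 (by omega)
  · rw [pvLen_rotL, pvLen_setLast]
    exact hrow r hlt
  · exact hrow r hlt

theorem pvLoop_eq (ops : List String) (m : List (List Int)) (s0 s1 : List Int) (C : Nat)
    (h0 : s0.length = m.length) (h1 : s1.length = m.length)
    (hops : ∀ op ∈ ops, op = "ShiftRow" ∨ op = "Rotate")
    (hshape : "Rotate" ∈ ops → 2 ≤ m.length ∧ 2 ≤ C ∧ pvRect C m) :
    pvWb3 (ops.foldl pvStepA (m, s0, s1)).1 (ops.foldl pvStepA (m, s0, s1)).2.1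
        (ops.foldl pvStepA (m, s0, s1)).2.2
      = ops.foldl pvStepB (pvWb3 m s0 s1) := by
  induction ops generalizing m s0 s1 with
  | nil => rfl
  | cons op rest ih =>
    rcases hops op (List.mem_cons_self) with hop | hop
    · -- ShiftRow
      subst hop
      rw [List.foldl_cons, List.foldl_cons]
      rw [show pvStepA (m, s0, s1) "ShiftRow" = pvShiftA (m, s0, s1) from rfl,
        pvStepB_shift, ← pvShift_comm m s0 s1 h0 h1]
      exact ih (pvRotR m) (pvRotR s0) (pvRotR s1)
        (by rw [pvLen_rotR, pvLen_rotR, h0]) (by rw [pvLen_rotR, pvLen_rotR, h1])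
        (fun o ho => hops o (List.mem_cons_of_mem _ ho))
        (fun hmem => by
          obtain ⟨a, b, c⟩ := hshape (List.mem_cons_of_mem _ hmem)
          exact ⟨by rw [pvLen_rotR]; exact a, b, pvPres_shift m C c⟩)
    · -- Rotate
      subst hop
      obtain ⟨ha, hb, hc⟩ := hshape (List.mem_cons_self)
      rw [List.foldl_cons, List.foldl_cons]
      rw [show pvStepA (m, s0, s1) "Rotate" = pvRotateA (m, s0, s1) from by
          simp [pvStepA]]
      rw [← pvRot_comm' m s0 s1 C h0 h1 ha hb hc]
      exact ih (pvRotateA (m, s0, s1)).1 (pvRotateA (m, s0, s1)).2.1 (pvRotateA (m, s0, s1)).2.2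
        (by rw [pvLen_rotA_s0, pvLen_rotA_m, h0]) (by rw [pvLen_rotA_s1, pvLen_rotA_m, h1])
        (fun o ho => hops o (List.mem_cons_of_mem _ ho))
        (fun _ => ⟨by rw [pvLen_rotA_m]; exact ha, hb, pvPres_rot m s0 s1 C ha h1 hc⟩)

theorem pvRow_id (row : List Int) (hne : row ≠ []) :
    pvSetLast (row.set 0 (row.headD 0)) (row.getLastD 0) = row := by
  cases row with
  | nil => simp at hne
  | cons x xs =>
    simp only [List.headD_cons, List.set_cons_zero]
    apply pvExt_getD _ _ 0 (by simp [pvLen_setLast])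
    intro i hi
    rw [pvLen_setLast] at hi
    rw [pvGetD_setLast _ _ _ _ hi, pvGetLastD_eq]
    split_ifs with h
    · rw [h]
    · rfl

theorem pvWb3_id (rc : List (List Int)) (hne : ∀ row ∈ rc, row ≠ []) :
    pvWb3 rc (rc.map (fun x => x.headD 0)) (rc.map (fun x => x.getLastD 0)) = rc := by
  induction rc with
  | nil => rfl
  | cons row m ih =>
    simp only [List.map_cons, pvWb3]
    rw [pvRow_id row (hne row (List.mem_cons_self)), ih (fun r hr => hne r (List.mem_cons_of_mem _ hr))]

-- ===== VERDICT (by name: the statement is the Claim_ definition above) =====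
theorem solution_spec : Claim_equal_solution := by
  intro rc ops _ hpre
  obtain ⟨hne, hops, hshape⟩ := hpre
  unfold Spec_solution solution solution_alt
  simp only [List.map_id_fun', id]
  have key := pvLoop_eq ops rc (rc.map (fun x => x.headD 0)) (rc.map (fun x => x.getLastD 0))
    (rc.headD []).length (by simp) (by simp) hops
    (fun h => by obtain ⟨a, b, c⟩ := hshape h; exact ⟨a, b, c⟩)
  rw [pvWb3_id rc hne] at key
  exact key
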